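-- pv_equiv track=rewrite | github.com/xthebat/iu4-2k21-mlni | ya-flyingbat/sem05/prepare_dfs.py | dfs
-- ===== SOURCE A (Python) =====
-- from typing import Dict, Optional, Set
--
-- def dfs(start: str, adj: Dict[str, Dict[str, int]], dist: int = 0, visited: Optional[Set[str]] = None):
--     visited = visited or set()
--     if start in visited:
--         return
--     visited.add(start)
--     yield start, dist
--     for other_node, other_dist in adj[start].items():
--         yield from dfs(other_node, adj, dist + other_dist, visited)
-- ===== SOURCE B (Python) =====
-- def dfs(start, adj, dist=0, visited=None):
--     # iterative DFS with an explicit stack instead of recursive generators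
--     visited = visited or set()
--     stack = [(start, dist)]
--     while stack:
--         node, d = stack.pop()
--         if node in visited:
--             continue
--         visited.add(node)
--         yield node, d
--         children = list(adj[node].items())
--         for child, w in reversed(children):
--             stack.append((child, d + w))
-- ===== Notes on version B (the rewrite author's own statement) =====
-- stated objective: alternative
-- what changed: A's recursive generator DFS (call stack + yield from) is replaced by an iterative DFS generator driven by an explicit stack of (node, dist) pairs, pushing children in reversed order so the yielded preorder and first-reached distances are identical.
import Mathlib
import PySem

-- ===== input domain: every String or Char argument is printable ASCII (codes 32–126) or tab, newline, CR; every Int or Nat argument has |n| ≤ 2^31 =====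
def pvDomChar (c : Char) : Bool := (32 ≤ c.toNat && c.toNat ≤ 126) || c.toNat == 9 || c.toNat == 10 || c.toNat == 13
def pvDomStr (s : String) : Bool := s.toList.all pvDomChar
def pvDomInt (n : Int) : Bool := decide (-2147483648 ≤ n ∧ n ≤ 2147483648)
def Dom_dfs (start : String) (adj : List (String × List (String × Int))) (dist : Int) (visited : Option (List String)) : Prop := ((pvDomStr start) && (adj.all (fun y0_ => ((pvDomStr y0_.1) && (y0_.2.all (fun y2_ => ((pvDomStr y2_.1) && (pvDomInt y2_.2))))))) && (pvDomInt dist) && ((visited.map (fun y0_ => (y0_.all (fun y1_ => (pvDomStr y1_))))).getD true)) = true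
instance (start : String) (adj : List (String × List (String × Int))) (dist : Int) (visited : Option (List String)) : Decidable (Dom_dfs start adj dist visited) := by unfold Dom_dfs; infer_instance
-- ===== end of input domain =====

-- B replaces A's recursive generator by an iterative DFS with an explicit stack (same
-- yielded sequence, a different decomposition); both Pythons mutate the caller's `visited`
-- set identically, the equivalence proved here is about the returned (yielded) sequence.

-- ===== PORT A =====
-- A is a recursive generator; its `for … yield from dfs(…)` loop over the children is the
-- mutually recursive dfsListA below.  The generator is materialised as the list of its
-- yields, threading the mutated `visited` set through; `f` is a fuel bound on recursion
-- depth (the main lemmas prove adj.length + 2 is enough on every input admitted by Pre_dfs).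
mutual
def dfsA (adj : List (String × List (String × Int))) (f : Nat) (s : String) (d : Int) (vis : PySem.Set String) : List (String × Int) × PySem.Set String :=
  match f with
  | 0 => ([], vis)
  | f' + 1 =>
    if PySem.Set.contains vis s then ([], vis)           -- if start in visited: return
    else
      let vis1 := PySem.Set.add vis s                    -- visited.add(start)
      -- adj[start].items(); get? = none is Python's KeyError, excluded by Pre_dfs
      let children := ((PySem.Dict.mk adj).get? s).getD []
      let r := dfsListA adj f' (children.map (fun cw => (cw.1, d + cw.2))) vis1
      ((s, d) :: r.1, r.2)                               -- yield (start, dist), then the loop's yields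
termination_by (f, 0)

def dfsListA (adj : List (String × List (String × Int))) (f : Nat) (ts : List (String × Int)) (vis : PySem.Set String) : List (String × Int) × PySem.Set String :=
  match ts with
  | [] => ([], vis)
  | (s, d) :: ts' =>
    let r1 := dfsA adj f s d vis
    let r2 := dfsListA adj f ts' r1.2
    (r1.1 ++ r2.1, r2.2)
termination_by (f, ts.length + 1)
end

def dfs (start : String) (adj : List (String × List (String × Int))) (dist : Int) (visited : Option (List String)) : List (String × Int) :=
  -- visited = visited or set(): None and the empty set both become a fresh empty set
  (dfsA adj (adj.length + 2) start dist (PySem.Set.ofList (visited.getD []))).1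

-- ===== PORT B =====
-- Source B keeps the stack with its top at the END of a Python list; here the top is the HEAD,
-- so `stack.extend(reversed(children))` followed by popping is `children ++ rest`.
-- `f` is a fuel bound on loop iterations (the main lemmas prove the bound passed by
-- dfs_alt is enough on every input admitted by Pre_dfs).
def dfsB (adj : List (String × List (String × Int))) (f : Nat) (stack : List (String × Int)) (vis : PySem.Set String) : List (String × Int) :=
  match f, stack with
  | 0, _ => []                                            -- fuel exhausted (never reached from dfs_alt under Pre_dfs)
  | _ + 1, [] => []                                       -- while stack: loop ends
  | f' + 1, (node, d) :: rest =>
    if PySem.Set.contains vis node then dfsB adj f' rest vis     -- if node in visited: continue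
    else
      let vis1 := PySem.Set.add vis node                  -- visited.add(node)
      let children := ((PySem.Dict.mk adj).get? node).getD []    -- adj[node].items(); none = KeyError, outside Pre_dfs
      (node, d) :: dfsB adj f' (children.map (fun cw => (cw.1, d + cw.2)) ++ rest) vis1

def dfs_alt (start : String) (adj : List (String × List (String × Int))) (dist : Int) (visited : Option (List String)) : List (String × Int) :=
  dfsB adj (adj.length + (adj.flatMap (fun kv => kv.2)).length + 2) [(start, dist)] (PySem.Set.ofList (visited.getD []))

-- ===== PRECONDITION & SPEC =====
-- nodes that appear as children anywhere in adj
def pvChildren (adj : List (String × List (String × Int))) : List String :=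
  adj.flatMap (fun kv => kv.2.map Prod.fst)

-- one expansion step of graph reachability: add the children of every already-reached
-- key that is not initially visited
def pvStep (adj : List (String × List (String × Int))) (V0 : List String) (S : Finset String) : Finset String :=
  S ∪ ((adj.filter (fun kv => decide (kv.1 ∈ S) && !(V0.contains kv.1))).flatMap (fun kv => kv.2.map Prod.fst)).toFinset

def pvReachN (adj : List (String × List (String × Int))) (V0 : List String) : Nat → Finset String → Finset String
  | 0, S => S
  | n + 1, S => pvReachN adj V0 n (pvStep adj V0 S)

-- the set of nodes reachable from start through keys not in the initial visited set
-- ((pvChildren adj).length + 1 expansion steps reach the fixpoint, proved below)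
def pvReach (adj : List (String × List (String × Int))) (V0 : List String) (start : String) : Finset String :=
  pvReachN adj V0 ((pvChildren adj).length + 1) {start}

-- Pre_dfs excludes exactly the inputs on which A raises KeyError: those whose traversal
-- reaches a node that is neither a key of adj nor initially visited.
def Pre_dfs (start : String) (adj : List (String × List (String × Int))) (dist : Int) (visited : Option (List String)) : Prop :=
  ∀ r ∈ pvReach adj (visited.getD []) start, r ∈ adj.map Prod.fst ∨ r ∈ visited.getD []
instance (start : String) (adj : List (String × List (String × Int))) (dist : Int) (visited : Option (List String)) : Decidable (Pre_dfs start adj dist visited) := by unfold Pre_dfs; infer_instance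

def pvWitness_dfs : String × (List (String × List (String × Int))) × Int × Option (List String) :=
  ("a", [("a", [("b", 1), ("c", 2)]), ("b", [("a", 5)]), ("c", [])], 0, none)

def Spec_dfs (start : String) (adj : List (String × List (String × Int))) (dist : Int) (visited : Option (List String)) (out : List (String × Int)) : Prop := out = dfs_alt start adj dist visited
instance (start : String) (adj : List (String × List (String × Int))) (dist : Int) (visited : Option (List String)) (out : List (String × Int)) : Decidable (Spec_dfs start adj dist visited out) := by unfold Spec_dfs; infer_instance

-- ===== CLAIM (what is proved, stated in full; the proofs are below) =====
def Claim_equal_dfs : Prop := ∀ (start : String) (adj : List (String × List (String × Int))) (dist : Int) (visited : Option (List String)), Dom_dfs start adj dist visited → Pre_dfs start adj dist visited → Spec_dfs start adj dist visited (dfs start adj dist visited)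

-- ===== LEMMAS AND PROOFS =====

-- keys of adj as a Finset, and the number of them not yet visited (bounds A's recursion depth)
def pvKf (adj : List (String × List (String × Int))) : Finset String := (adj.map Prod.fst).toFinset
def pvNu (adj : List (String × List (String × Int))) (vis : List String) : Nat :=
  (pvKf adj \ vis.toFinset).card
-- potential bounding the number of remaining iterations of B's stack loop
def pvPot (adj : List (String × List (String × Int))) (vis : PySem.Set String) : Nat :=
  match adj with
  | [] => 0
  | kv :: t => (if kv.1 ∈ vis then 0 else 1 + kv.2.length) + pvPot t vis

theorem pv_subset_pvStep (adj : List (String × List (String × Int))) (V0 : List String) (S : Finset String) : S ⊆ pvStep adj V0 S := by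
  unfold pvStep; exact Finset.subset_union_left

theorem pv_pvStep_sub (adj : List (String × List (String × Int))) (V0 : List String) (S : Finset String) :
    pvStep adj V0 S ⊆ S ∪ (pvChildren adj).toFinset := by
  unfold pvStep
  apply Finset.union_subset_union_right
  intro x hx
  simp only [List.mem_toFinset, pvChildren, List.mem_flatMap, List.mem_filter, List.mem_map] at hx ⊢
  obtain ⟨kv, ⟨hkv, _⟩, hx⟩ := hx
  exact ⟨kv, hkv, hx⟩

theorem pv_pvReachN_fixed (adj : List (String × List (String × Int))) (V0 : List String) (n : Nat) (S : Finset String)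
    (h : pvStep adj V0 S = S) : pvReachN adj V0 n S = S := by
  induction n with
  | zero => rfl
  | succ n ih => simp [pvReachN, h, ih]

theorem pv_subset_pvReachN (adj : List (String × List (String × Int))) (V0 : List String) (n : Nat) (S : Finset String) :
    S ⊆ pvReachN adj V0 n S := by
  induction n generalizing S with
  | zero => exact fun x hx => hx
  | succ n ih =>
    intro x hx
    exact ih (pvStep adj V0 S) (pv_subset_pvStep adj V0 S hx)

theorem pv_pvStep_reachN_eq (adj : List (String × List (String × Int))) (V0 : List String) :
    ∀ (n : Nat) (S : Finset String), ((pvChildren adj).toFinset \ S).card ≤ n →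
      pvStep adj V0 (pvReachN adj V0 n S) = pvReachN adj V0 n S := by
  intro n
  induction n with
  | zero =>
    intro S h
    have hsub : (pvChildren adj).toFinset ⊆ S := by
      intro x hx
      by_contra hxS
      have : x ∈ (pvChildren adj).toFinset \ S := Finset.mem_sdiff.mpr ⟨hx, hxS⟩
      have := Finset.card_pos.mpr ⟨x, this⟩
      omega
    have hfix : pvStep adj V0 S = S := by
      apply Finset.Subset.antisymm
      · intro x hx
        rcases Finset.mem_union.mp (pv_pvStep_sub adj V0 S hx) with h1 | h1
        · exact h1
        · exact hsub h1
      · exact pv_subset_pvStep adj V0 S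
    simpa [pvReachN] using hfix
  | succ n ih =>
    intro S h
    by_cases hfix : pvStep adj V0 S = S
    · have h1 : pvReachN adj V0 (n + 1) S = S := pv_pvReachN_fixed adj V0 (n + 1) S hfix
      rw [h1]; exact hfix
    · have hstrict : S ⊂ pvStep adj V0 S :=
        HasSubset.Subset.ssubset_of_ne (pv_subset_pvStep adj V0 S) (fun h' => hfix h'.symm)
      obtain ⟨x, hxstep, hxS⟩ := Finset.exists_of_ssubset hstrict
      have hxc : x ∈ (pvChildren adj).toFinset := by
        rcases Finset.mem_union.mp (pv_pvStep_sub adj V0 S hxstep) with h1 | h1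
        · exact absurd h1 hxS
        · exact h1
      have hcard : ((pvChildren adj).toFinset \ pvStep adj V0 S).card < ((pvChildren adj).toFinset \ S).card := by
        apply Finset.card_lt_card
        constructor
        · exact Finset.sdiff_subset_sdiff (Finset.Subset.refl _) (pv_subset_pvStep adj V0 S)
        · intro hcon
          have : x ∈ (pvChildren adj).toFinset \ pvStep adj V0 S :=
            hcon (Finset.mem_sdiff.mpr ⟨hxc, hxS⟩)
          exact (Finset.mem_sdiff.mp this).2 hxstep
      have := ih (pvStep adj V0 S) (by omega)
      simpa [pvReachN] using this

theorem pv_pvReach_closed (adj : List (String × List (String × Int))) (V0 : List String) (start : String) :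
    pvStep adj V0 (pvReach adj V0 start) = pvReach adj V0 start := by
  unfold pvReach
  apply pv_pvStep_reachN_eq
  have h1 : ((pvChildren adj).toFinset \ ({start} : Finset String)).card ≤ (pvChildren adj).toFinset.card :=
    Finset.card_le_card (Finset.sdiff_subset)
  have h2 := List.toFinset_card_le (pvChildren adj)
  omega

theorem pv_mem_pvReach_self (adj : List (String × List (String × Int))) (V0 : List String) (start : String) :
    start ∈ pvReach adj V0 start := by
  unfold pvReach
  exact pv_subset_pvReachN adj V0 _ {start} (Finset.mem_singleton_self start)

-- a key of adj has a successful lookup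
theorem pv_get?_of_mem_keys (adj : List (String × List (String × Int))) (s : String)
    (h : s ∈ adj.map Prod.fst) : ∃ l, (PySem.Dict.mk adj).get? s = some l := by
  cases hg : (PySem.Dict.mk adj).get? s with
  | none =>
    exfalso
    apply (PySem.Dict.get?_eq_none_iff_not_mem_keys (PySem.Dict.mk adj) s).mp hg
    simpa [PySem.Dict.keys] using h
  | some l => exact ⟨l, rfl⟩

-- the visited set only grows (A side)
theorem pv_growListA_of_A (adj : List (String × List (String × Int))) (f : Nat)
    (hA : ∀ (s : String) (d : Int) (vis : PySem.Set String) (x : String), x ∈ vis → x ∈ (dfsA adj f s d vis).2) :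
    ∀ (ts : List (String × Int)) (vis : PySem.Set String) (x : String), x ∈ vis → x ∈ (dfsListA adj f ts vis).2 := by
  intro ts
  induction ts with
  | nil => intro vis x hx; simpa [dfsListA] using hx
  | cons t ts ih =>
    intro vis x hx
    obtain ⟨s, d⟩ := t
    simp only [dfsListA]
    exact ih _ _ (hA s d vis x hx)

theorem pv_growA (adj : List (String × List (String × Int))) :
    ∀ (f : Nat) (s : String) (d : Int) (vis : PySem.Set String) (x : String), x ∈ vis → x ∈ (dfsA adj f s d vis).2 := by
  intro f
  induction f with
  | zero => intro s d vis x hx; simpa [dfsA] using hx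
  | succ f ih =>
    intro s d vis x hx
    by_cases hs : s ∈ vis
    · simpa [dfsA, hs] using hx
    · have := pv_growListA_of_A adj f ih
        ((((PySem.Dict.mk adj).get? s).getD []).map (fun cw => (cw.1, d + cw.2)))
        (PySem.Set.add vis s) x ((PySem.Set.mem_add vis s x).mpr (Or.inl hx))
      simpa [dfsA, hs] using this

theorem pv_growListA (adj : List (String × List (String × Int))) (f : Nat) (ts : List (String × Int))
    (vis : PySem.Set String) (x : String) (hx : x ∈ vis) : x ∈ (dfsListA adj f ts vis).2 :=
  pv_growListA_of_A adj f (pv_growA adj f) ts vis x hx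

-- processing a concatenated task list splits
theorem pv_dfsListA_append (adj : List (String × List (String × Int))) (f : Nat) :
    ∀ (xs ys : List (String × Int)) (vis : PySem.Set String),
      dfsListA adj f (xs ++ ys) vis =
        ((dfsListA adj f xs vis).1 ++ (dfsListA adj f ys (dfsListA adj f xs vis).2).1,
          (dfsListA adj f ys (dfsListA adj f xs vis).2).2) := by
  intro xs
  induction xs with
  | nil => intro ys vis; simp [dfsListA]
  | cons x xs ih =>
    intro ys vis
    obtain ⟨s, d⟩ := x
    simp only [List.cons_append, dfsListA, ih, List.append_assoc]

-- the loop potential is antitone in the visited set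
theorem pv_pot_mono (adj : List (String × List (String × Int))) (vis vis' : PySem.Set String)
    (h : ∀ x ∈ vis, x ∈ vis') : pvPot adj vis' ≤ pvPot adj vis := by
  induction adj with
  | nil => simp [pvPot]
  | cons kv t ih =>
    simp only [pvPot]
    by_cases h1 : kv.1 ∈ vis
    · have h2 : kv.1 ∈ vis' := h kv.1 h1
      simp only [h1, h2, if_true]
      omega
    · by_cases h2 : kv.1 ∈ vis' <;> simp only [h1, h2, if_true, if_false] <;> omega

-- visiting a node drops its whole entry from the potential
theorem pv_pot_visit (adj : List (String × List (String × Int))) (vis : PySem.Set String)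
    (s : String) (l : List (String × Int)) (hs : s ∉ vis) (hmem : (s, l) ∈ adj) :
    pvPot adj (PySem.Set.add vis s) + 1 + l.length ≤ pvPot adj vis := by
  have hmemadd : s ∈ PySem.Set.add vis s := (PySem.Set.mem_add vis s s).mpr (Or.inr rfl)
  induction adj with
  | nil => simp at hmem
  | cons kv t ih =>
    have hmono : pvPot t (PySem.Set.add vis s) ≤ pvPot t vis :=
      pv_pot_mono t vis (PySem.Set.add vis s) (fun x hx => (PySem.Set.mem_add vis s x).mpr (Or.inl hx))
    rcases List.mem_cons.mp hmem with heq | htail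
    · -- kv = (s, l): counted under vis, dropped under vis.add s
      subst heq
      simp only [pvPot]
      rw [if_pos (show (s, l).1 ∈ PySem.Set.add vis s from hmemadd),
        if_neg (show (s, l).1 ∉ vis from hs)]
      omega
    · -- (s, l) is in the tail
      have hhead : (if kv.1 ∈ PySem.Set.add vis s then 0 else 1 + kv.2.length)
          ≤ (if kv.1 ∈ vis then 0 else 1 + kv.2.length) := by
        by_cases h1 : kv.1 ∈ vis
        · have : kv.1 ∈ PySem.Set.add vis s := (PySem.Set.mem_add vis s kv.1).mpr (Or.inl h1)
          simp [h1, this]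
        · by_cases h2 : kv.1 ∈ PySem.Set.add vis s <;> simp [h1, h2]
      have := ih htail
      simp only [pvPot]
      omega

theorem pv_pot_le_total (adj : List (String × List (String × Int))) (vis : PySem.Set String) :
    pvPot adj vis ≤ adj.length + (adj.flatMap (fun kv => kv.2)).length := by
  induction adj with
  | nil => simp [pvPot]
  | cons kv t ih =>
    simp only [pvPot, List.length_cons, List.flatMap_cons, List.length_append]
    by_cases h1 : kv.1 ∈ vis <;> simp only [h1, if_true, if_false] <;> omega

theorem pv_nu_mono (adj : List (String × List (String × Int))) (vis vis' : PySem.Set String)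
    (h : ∀ x ∈ vis, x ∈ vis') : pvNu adj vis' ≤ pvNu adj vis := by
  unfold pvNu
  apply Finset.card_le_card
  apply Finset.sdiff_subset_sdiff (Finset.Subset.refl _)
  intro x hx
  simp only [List.mem_toFinset] at hx ⊢
  exact h x hx

theorem pv_nu_lt (adj : List (String × List (String × Int))) (vis : PySem.Set String) (s : String)
    (hsK : s ∈ adj.map Prod.fst) (hs : s ∉ vis) :
    pvNu adj (PySem.Set.add vis s) < pvNu adj vis := by
  unfold pvNu
  have hmemsd : s ∈ pvKf adj \ vis.toFinset := by
    simp only [Finset.mem_sdiff, pvKf, List.mem_toFinset]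
    exact ⟨hsK, hs⟩
  calc (pvKf adj \ (PySem.Set.add vis s).toFinset).card
      ≤ ((pvKf adj \ vis.toFinset).erase s).card := by
        apply Finset.card_le_card
        intro x hx
        simp only [Finset.mem_sdiff, List.mem_toFinset] at hx
        have hxadd : ¬(x ∈ vis ∨ x = s) := fun h => hx.2 ((PySem.Set.mem_add vis s x).mpr h)
        simp only [Finset.mem_erase, Finset.mem_sdiff, List.mem_toFinset]
        exact ⟨fun h => hxadd (Or.inr h), hx.1, fun h => hxadd (Or.inl h)⟩
    _ < (pvKf adj \ vis.toFinset).card := Finset.card_erase_lt_of_mem hmemsd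

-- MAIN LEMMA: with enough fuel on both sides, A's recursive traversal of a task list
-- computes the same yields as B's stack loop
theorem pv_main (adj : List (String × List (String × Int))) (V0 : List String) (R : Finset String)
    (hfix : pvStep adj V0 R = R)
    (hclose : ∀ r ∈ R, r ∈ adj.map Prod.fst ∨ r ∈ V0) :
    ∀ (g : Nat) (tasks : List (String × Int)) (vis : PySem.Set String) (fA : Nat),
      (∀ x ∈ V0, x ∈ vis) →
      (∀ p ∈ tasks, p.1 ∈ R ∨ p.1 ∈ vis) →
      pvNu adj vis + 1 ≤ fA →
      pvPot adj vis + tasks.length + 1 ≤ g →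
      (dfsListA adj fA tasks vis).1 = dfsB adj g tasks vis := by
  intro g
  induction g with
  | zero => intro tasks vis fA _ _ _ hfB; omega
  | succ g ih =>
    intro tasks vis fA hV0 hT hfA hfB
    match tasks with
    | [] => simp [dfsListA, dfsB]
    | (s, d) :: ts =>
      obtain ⟨fA', rfl⟩ : ∃ k, fA = k + 1 := ⟨fA - 1, by omega⟩
      by_cases hs : s ∈ vis
      · -- already visited: both sides skip
        have htail : (dfsListA adj (fA' + 1) ts vis).1 = dfsB adj g ts vis := by
          apply ih ts vis (fA' + 1) hV0 (fun p hp => hT p (List.mem_cons_of_mem _ hp)) hfA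
          simp only [List.length_cons] at hfB; omega
        have hA0 : dfsA adj (fA' + 1) s d vis = ([], vis) := by simp [dfsA, hs]
        have hB0 : dfsB adj (g + 1) ((s, d) :: ts) vis = dfsB adj g ts vis := by simp [dfsB, hs]
        rw [hB0, ← htail]
        simp only [dfsListA, hA0]
        simp
      · -- new node: both sides visit s and continue with its children on top
        have hsR : s ∈ R := ((hT (s, d) List.mem_cons_self).resolve_right hs)
        have hsV0 : s ∉ V0 := fun h => hs (hV0 s h)
        have hsK : s ∈ adj.map Prod.fst := (hclose s hsR).resolve_right (fun h => absurd h hsV0)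
        obtain ⟨l, hl⟩ := pv_get?_of_mem_keys adj s hsK
        have hlmem : (s, l) ∈ adj := PySem.Dict.mem_items_of_get?_eq_some (PySem.Dict.mk adj) hl
        have hch : ∀ c ∈ l, c.1 ∈ R := by
          intro c hcmem
          have hstep : c.1 ∈ pvStep adj V0 R := by
            unfold pvStep
            apply Finset.mem_union_right
            simp only [List.mem_toFinset, List.mem_flatMap, List.mem_filter, List.mem_map]
            refine ⟨(s, l), ⟨hlmem, ?_⟩, c, hcmem, rfl⟩
            simp [hsR, hsV0]
          rwa [hfix] at hstep
        set vis1 := PySem.Set.add vis s with hvis1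
        set ch := l.map (fun cw => (cw.1, d + cw.2)) with hchdef
        have hvis_sub1 : ∀ x ∈ vis, x ∈ vis1 := fun x hx => (PySem.Set.mem_add vis s x).mpr (Or.inl hx)
        have hpot : pvPot adj vis1 + 1 + l.length ≤ pvPot adj vis := pv_pot_visit adj vis s l hs hlmem
        have hnu : pvNu adj vis1 < pvNu adj vis := pv_nu_lt adj vis s hsK hs
        set rC := dfsListA adj fA' ch vis1 with hrC
        have hgrow : ∀ x ∈ vis1, x ∈ rC.2 := fun x hx => pv_growListA adj fA' ch vis1 x hx
        -- IH on the children pushed in front of the rest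
        have h1 : (dfsListA adj fA' (ch ++ ts) vis1).1 = dfsB adj g (ch ++ ts) vis1 := by
          apply ih (ch ++ ts) vis1 fA'
          · exact fun x hx => hvis_sub1 x (hV0 x hx)
          · intro p hp
            rcases List.mem_append.mp hp with hp | hp
            · obtain ⟨cw, hcw, rfl⟩ := List.mem_map.mp hp
              exact Or.inl (hch cw hcw)
            · rcases hT p (List.mem_cons_of_mem _ hp) with h | h
              · exact Or.inl h
              · exact Or.inr (hvis_sub1 p.1 h)
          · omega
          · simp only [List.length_append, List.length_map, hchdef, List.length_cons] at hfB ⊢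
            omega
        -- IH twice on the rest, with both A-fuels, through B
        have hsubR : ∀ x ∈ vis, x ∈ rC.2 := fun x hx => hgrow x (hvis_sub1 x hx)
        have hTts : ∀ p ∈ ts, p.1 ∈ R ∨ p.1 ∈ rC.2 := by
          intro p hp
          rcases hT p (List.mem_cons_of_mem _ hp) with h | h
          · exact Or.inl h
          · exact Or.inr (hsubR p.1 h)
        have hV0R : ∀ x ∈ V0, x ∈ rC.2 := fun x hx => hsubR x (hV0 x hx)
        have hnuR : pvNu adj rC.2 ≤ pvNu adj vis1 := pv_nu_mono adj vis1 rC.2 hgrow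
        have hpotR : pvPot adj rC.2 ≤ pvPot adj vis1 := pv_pot_mono adj vis1 rC.2 hgrow
        have h2 : (dfsListA adj (fA' + 1) ts rC.2).1 = dfsB adj g ts rC.2 := by
          apply ih ts rC.2 (fA' + 1) hV0R hTts
          · omega
          · simp only [List.length_cons] at hfB; omega
        have h3 : (dfsListA adj fA' ts rC.2).1 = dfsB adj g ts rC.2 := by
          apply ih ts rC.2 fA' hV0R hTts
          · omega
          · simp only [List.length_cons] at hfB; omega
        -- unfold both sides
        have hA : dfsA adj (fA' + 1) s d vis = ((s, d) :: rC.1, rC.2) := by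
          simp only [dfsA, hl, Option.getD_some, ← hvis1, ← hchdef, ← hrC]
          rw [if_neg (fun h => hs ((PySem.Set.contains_iff vis s).mp h))]
        have hB : dfsB adj (g + 1) ((s, d) :: ts) vis = (s, d) :: dfsB adj g (ch ++ ts) vis1 := by
          simp only [dfsB, hl, Option.getD_some, ← hvis1, ← hchdef]
          rw [if_neg (fun h => hs ((PySem.Set.contains_iff vis s).mp h))]
        have hsplit := pv_dfsListA_append adj fA' ch ts vis1
        calc (dfsListA adj (fA' + 1) ((s, d) :: ts) vis).1
            = (dfsA adj (fA' + 1) s d vis).1 ++ (dfsListA adj (fA' + 1) ts (dfsA adj (fA' + 1) s d vis).2).1 := by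
              simp [dfsListA]
          _ = (s, d) :: (rC.1 ++ (dfsListA adj (fA' + 1) ts rC.2).1) := by rw [hA]; simp
          _ = (s, d) :: (rC.1 ++ dfsB adj g ts rC.2) := by rw [h2]
          _ = (s, d) :: (rC.1 ++ (dfsListA adj fA' ts rC.2).1) := by rw [h3]
          _ = (s, d) :: (dfsListA adj fA' (ch ++ ts) vis1).1 := by rw [hsplit]
          _ = (s, d) :: dfsB adj g (ch ++ ts) vis1 := by rw [h1]
          _ = dfsB adj (g + 1) ((s, d) :: ts) vis := hB.symm

-- ===== VERDICT (by name: the statement is the Claim_ definition above) =====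
theorem dfs_spec : Claim_equal_dfs := by
  unfold Claim_equal_dfs
  intro start adj dist visited _ hpre
  unfold Spec_dfs dfs dfs_alt
  set V0 := visited.getD [] with hV0def
  set vis0 := PySem.Set.ofList V0 with hvis0
  have hsingle : (dfsListA adj (adj.length + 2) [(start, dist)] vis0).1
      = (dfsA adj (adj.length + 2) start dist vis0).1 := by
    simp [dfsListA]
  rw [← hsingle]
  apply pv_main adj V0 (pvReach adj V0 start) (pv_pvReach_closed adj V0 start) hpre
  · intro x hx; exact (PySem.Set.mem_ofList V0 x).mpr hx
  · intro p hp
    simp only [List.mem_singleton] at hp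
    subst hp
    exact Or.inl (pv_mem_pvReach_self adj V0 start)
  · have h1 : pvNu adj vis0 ≤ (pvKf adj).card := Finset.card_le_card Finset.sdiff_subset
    have h2 : (pvKf adj).card ≤ (adj.map Prod.fst).length := List.toFinset_card_le _
    simp only [List.length_map] at h2
    omega
  · have h1 := pv_pot_le_total adj vis0
    simp only [List.length_cons, List.length_nil]
    omega
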